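-- pv_equiv track=rewrite | github.com/ckoons/BubbleSpacetimeTheory | play/toy_473_fourcolor_gallery.py | is_strictly_tangled
-- ===== SOURCE A (Python) =====
-- from collections import defaultdict, deque, Counter
--
-- def kempe_chain(adj, color, v, c1, c2, exclude=None):
--     """Find maximal (c1,c2)-chain containing v."""
--     if exclude is None:
--         exclude = set()
--     if v in exclude or color.get(v) not in (c1, c2):
--         return set()
--     visited = set()
--     queue = deque([v])
--     while queue:
--         u = queue.popleft()
--         if u in visited or u in exclude:
--             continue
--         if color.get(u) not in (c1, c2):
--             continue
--         visited.add(u)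
--         for w in adj.get(u, set()):
--             if w not in visited and w not in exclude and color.get(w) in (c1, c2):
--                 queue.append(w)
--     return visited
--
-- def is_strictly_tangled(adj, color, v, c1, c2):
--     """Check if ALL c1/c2 neighbors of v are in the same chain."""
--     nbrs_c1 = [u for u in adj[v] if color.get(u) == c1]
--     nbrs_c2 = [u for u in adj[v] if color.get(u) == c2]
--     if not nbrs_c1 or not nbrs_c2:
--         return False
--     exclude = {v}
--     chain = kempe_chain(adj, color, nbrs_c1[0], c1, c2, exclude=exclude)
--     return all(u in chain for u in nbrs_c1) and all(u in chain for u in nbrs_c2)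
-- ===== SOURCE B (Python) =====
-- def is_strictly_tangled(adj, color, v, c1, c2):
--     """Check if ALL c1/c2 neighbors of v are in the same chain."""
--     nbrs_c1 = [u for u in adj[v] if color.get(u) == c1]
--     nbrs_c2 = [u for u in adj[v] if color.get(u) == c2]
--     if not nbrs_c1 or not nbrs_c2:
--         return False
--
--     def elig(u):
--         return u != v and color.get(u) in (c1, c2)
--
--     seed = nbrs_c1[0]
--     reach = {seed} if elig(seed) else set()
--     # naive fixed-point saturation: no worklist, repeated full passes
--     # over the adjacency dict until no new vertex can be added
--     changed = True
--     while changed: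
--         changed = False
--         for u, ws in adj.items():
--             if u in reach:
--                 for w in ws:
--                     if w not in reach and elig(w):
--                         reach.add(w)
--                         changed = True
--     return all(u in reach for u in nbrs_c1) and all(u in reach for u in nbrs_c2)
-- ===== Notes on version B (the rewrite author's own statement) =====
-- stated objective: alternative
-- what changed: A grows the Kempe chain with a seeded BFS helper (deque worklist, neighbours filtered before enqueue); B has no worklist at all: it saturates a reached-set by repeated full passes over the adjacency dict, adding eligible successors of already-reached vertices until a pass changes nothing.
import Mathlib
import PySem

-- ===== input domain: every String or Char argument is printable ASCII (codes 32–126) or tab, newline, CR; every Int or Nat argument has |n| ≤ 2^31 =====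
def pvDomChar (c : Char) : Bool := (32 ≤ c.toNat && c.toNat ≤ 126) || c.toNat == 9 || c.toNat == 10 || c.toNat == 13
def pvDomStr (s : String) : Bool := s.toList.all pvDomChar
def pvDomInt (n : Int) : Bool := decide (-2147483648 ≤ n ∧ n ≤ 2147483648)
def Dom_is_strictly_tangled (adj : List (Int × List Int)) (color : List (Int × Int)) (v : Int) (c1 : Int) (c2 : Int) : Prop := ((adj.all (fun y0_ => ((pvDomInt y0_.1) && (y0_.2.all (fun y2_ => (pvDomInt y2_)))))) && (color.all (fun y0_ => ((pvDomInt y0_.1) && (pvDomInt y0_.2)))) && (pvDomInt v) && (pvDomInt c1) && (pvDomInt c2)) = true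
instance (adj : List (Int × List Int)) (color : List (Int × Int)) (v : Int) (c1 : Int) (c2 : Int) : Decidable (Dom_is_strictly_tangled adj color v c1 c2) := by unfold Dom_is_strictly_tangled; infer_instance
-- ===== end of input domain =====

-- B replaces A's seeded-BFS helper (kempe_chain with a deque worklist) by a naive
-- fixed-point saturation: repeated full passes over the adjacency dict, adding eligible
-- successors of already-reached vertices until a pass changes nothing (alternative, not faster).


-- termination helpers (cited by the loops' decreasing_by)
theorem pvGetMemKeys {ν : Type} (l : List (Int × ν)) (u : Int)
    (h : (PySem.Dict.get? (PySem.Dict.mk l) u).isSome = true) : u ∈ l.map Prod.fst := by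
  induction l with
  | nil => simp [PySem.Dict.get?] at h
  | cons p rest ih =>
    rw [show PySem.Dict.mk (p :: rest) = PySem.Dict.mk ((p.1, p.2) :: rest) by simp,
        PySem.Dict.get?_mk_cons] at h
    by_cases hp : p.1 = u
    · simp [hp]
    · simp [show (p.1 == u) = false by simp [hp]] at h
      simpa using Or.inr (ih h)

theorem pvLenFilterLt {p q : Int → Bool} (l : List Int)
    (himp : ∀ x, q x = true → p x = true) (u : Int) (hu : u ∈ l)
    (hp : p u = true) (hq : q u = false) :
    (l.filter q).length < (l.filter p).length := by
  induction l with
  | nil => cases hu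
  | cons a t ih =>
    rcases List.mem_cons.mp hu with rfl | hut
    · have hpa := hp
      have heq : t.filter q = (t.filter p).filter q := by
        rw [List.filter_filter]
        apply List.filter_congr
        intro x _
        cases hqx : q x
        · simp
        · simp [himp x hqx]
      have hmono : (t.filter q).length ≤ (t.filter p).length := by
        rw [heq]; exact List.length_filter_le _ _
      simp [hq, hpa]
      omega
    · by_cases hqa : q a = true
      · have hpa := himp a hqa
        simp [hqa, hpa]
        exact ih hut
      · have h' := ih hut
        by_cases hpa : p a = true
        · simp [hpa, Bool.eq_false_iff.mpr (by simp [hqa] : ¬ q a = true)]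
          omega
        · simp [Bool.eq_false_iff.mpr (by simp [hqa] : ¬ q a = true),
                Bool.eq_false_iff.mpr (by simp [hpa] : ¬ p a = true)]
          exact h'

theorem pvMeasureLt (color : List (Int × Int)) (V : PySem.Set Int) (u : Int)
    (hu : u ∈ color.map Prod.fst) (hV : PySem.Set.contains V u = false) :
    ((color.map Prod.fst).filter (fun x => !PySem.Set.contains (PySem.Set.add V u) x)).length <
      ((color.map Prod.fst).filter (fun x => !PySem.Set.contains V x)).length := by
  apply pvLenFilterLt (l := color.map Prod.fst)
    (p := fun x => !PySem.Set.contains V x) (q := fun x => !PySem.Set.contains (PySem.Set.add V u) x)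
    (u := u)
  · intro x hx
    simp only [Bool.not_eq_true'] at hx ⊢
    by_contra hc
    have hc' : PySem.Set.contains V x = true := by
      cases h : PySem.Set.contains V x
      · exact absurd h hc
      · rfl
    have hxV : x ∈ V := (PySem.Set.contains_iff V x).mp hc'
    have : PySem.Set.contains (PySem.Set.add V u) x = true :=
      (PySem.Set.contains_iff _ x).mpr ((PySem.Set.mem_add V u x).mpr (Or.inl hxV))
    rw [this] at hx
    exact absurd hx (by simp)
  · exact hu
  · simp only [Bool.not_eq_true']
    exact hV
  · simp

-- ===== PORT A =====
-- color.get(u) in (c1, c2)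
def kcColorOk (color : List (Int × Int)) (c1 c2 u : Int) : Bool :=
  match PySem.Dict.get? (PySem.Dict.mk color) u with
  | some c => c == c1 || c == c2
  | none => false

-- adj.get(u, set())  (iterated only; value order irrelevant to A's result)
def kcNbrs (adj : List (Int × List Int)) (u : Int) : List Int :=
  (PySem.Dict.get? (PySem.Dict.mk adj) u).getD []

-- the while-queue loop of kempe_chain (deque popleft = list head)
def kempeLoop (adj : List (Int × List Int)) (color : List (Int × Int)) (c1 c2 : Int)
    (exclude : List Int) (visited : PySem.Set Int) (queue : List Int) : PySem.Set Int :=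
  match queue with
  | [] => visited
  | u :: rest =>
    if PySem.Set.contains visited u || exclude.contains u then
      kempeLoop adj color c1 c2 exclude visited rest
    else if !kcColorOk color c1 c2 u then
      kempeLoop adj color c1 c2 exclude visited rest
    else
      let visited' := PySem.Set.add visited u
      kempeLoop adj color c1 c2 exclude visited'
        (rest ++ (kcNbrs adj u).filter
          (fun w => !PySem.Set.contains visited' w && !exclude.contains w && kcColorOk color c1 c2 w))
termination_by ((((color.map Prod.fst).filter (fun x => !PySem.Set.contains visited x)).length, queue.length) : Nat × Nat)
decreasing_by
  · exact Prod.Lex.right _ (by simp)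
  · exact Prod.Lex.right _ (by simp)
  · apply Prod.Lex.left
    rename_i h1 h2
    have hcol : kcColorOk color c1 c2 u = true := by
      simpa using h2
    have hV : PySem.Set.contains visited u = false := by
      simp only [Bool.or_eq_true, not_or, Bool.not_eq_true] at h1
      exact h1.1
    apply pvMeasureLt
    · apply pvGetMemKeys
      unfold kcColorOk at hcol
      cases hg : PySem.Dict.get? (PySem.Dict.mk color) u <;> simp [hg] at hcol ⊢
    · exact hV

def kempe_chain (adj : List (Int × List Int)) (color : List (Int × Int))
    (s c1 c2 : Int) (exclude : List Int) : PySem.Set Int :=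
  if exclude.contains s || !kcColorOk color c1 c2 s then PySem.Set.empty
  else kempeLoop adj color c1 c2 exclude PySem.Set.empty [s]

def is_strictly_tangled (adj : List (Int × List Int)) (color : List (Int × Int)) (v : Int) (c1 : Int) (c2 : Int) : Bool :=
  -- adj[v]: Pre_ excludes the KeyError case (v not a key of adj)
  let adjv := (PySem.Dict.get? (PySem.Dict.mk adj) v).getD []
  let nbrs1 := adjv.filter (fun u => PySem.Dict.get? (PySem.Dict.mk color) u == some c1)
  let nbrs2 := adjv.filter (fun u => PySem.Dict.get? (PySem.Dict.mk color) u == some c2)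
  match nbrs1, nbrs2 with
  | s :: _, _ :: _ =>
    let chain := kempe_chain adj color s c1 c2 [v]
    nbrs1.all (fun u => PySem.Set.contains chain u) && nbrs2.all (fun u => PySem.Set.contains chain u)
  | _, _ => false

-- ===== PORT B =====
-- color.get(u) in (c1, c2)
def satColorOk (color : List (Int × Int)) (c1 c2 u : Int) : Bool :=
  match PySem.Dict.get? (PySem.Dict.mk color) u with
  | some c => c == c1 || c == c2
  | none => false

-- elig(u): u != v and color.get(u) in (c1, c2)
def satElig (color : List (Int × Int)) (v c1 c2 u : Int) : Bool :=
  !(u == v) && satColorOk color c1 c2 u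

-- the inner 'for w in ws' loop: state = (reach, changed)
def satInner (color : List (Int × Int)) (v c1 c2 : Int)
    (st : PySem.Set Int × Bool) (ws : List Int) : PySem.Set Int × Bool :=
  ws.foldl (fun st w =>
    if !PySem.Set.contains st.1 w && satElig color v c1 c2 w then
      (PySem.Set.add st.1 w, true)
    else st) st

-- one 'for u, ws in adj.items()' step
def satStep (color : List (Int × Int)) (v c1 c2 : Int)
    (st : PySem.Set Int × Bool) (p : Int × List Int) : PySem.Set Int × Bool :=
  if PySem.Set.contains st.1 p.1 then satInner color v c1 c2 st p.2 else st

-- adj.items(): the key/value pairs the dict lookup yields (all of adj when keys are distinct)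
def satItems (adj : List (Int × List Int)) : List (Int × List Int) :=
  adj.filter (fun p => PySem.Dict.get? (PySem.Dict.mk adj) p.1 == some p.2)

-- one full pass over the adjacency dict; starts with changed = False
def satPass (adj : List (Int × List Int)) (color : List (Int × Int)) (v c1 c2 : Int)
    (reach : PySem.Set Int) : PySem.Set Int × Bool :=
  (satItems adj).foldl (satStep color v c1 c2) (reach, false)

-- growth facts the 'while changed' termination cites
theorem satInner_mono (color : List (Int × Int)) (v c1 c2 : Int) :
    ∀ (ws : List Int) (st : PySem.Set Int × Bool) (x : Int),
      x ∈ st.1 → x ∈ (satInner color v c1 c2 st ws).1 := by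
  intro ws
  induction ws with
  | nil => intro st x hx; exact hx
  | cons w rest ih =>
    intro st x hx
    simp only [satInner, List.foldl_cons] at *
    by_cases h : (!PySem.Set.contains st.1 w && satElig color v c1 c2 w) = true
    · rw [if_pos h]
      exact ih _ x ((PySem.Set.mem_add st.1 w x).mpr (Or.inl hx))
    · rw [if_neg h]
      exact ih _ x hx

theorem satFold_mono (color : List (Int × Int)) (v c1 c2 : Int) :
    ∀ (l : List (Int × List Int)) (st : PySem.Set Int × Bool) (x : Int),
      x ∈ st.1 → x ∈ (l.foldl (satStep color v c1 c2) st).1 := by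
  intro l
  induction l with
  | nil => intro st x hx; exact hx
  | cons p rest ih =>
    intro st x hx
    simp only [List.foldl_cons]
    apply ih
    unfold satStep
    by_cases h : PySem.Set.contains st.1 p.1 = true
    · rw [if_pos h]; exact satInner_mono color v c1 c2 p.2 st x hx
    · rw [if_neg h]; exact hx

theorem satInner_new (color : List (Int × Int)) (v c1 c2 : Int) :
    ∀ (ws : List Int) (st : PySem.Set Int × Bool),
      (satInner color v c1 c2 st ws).2 = true →
      st.2 = true ∨ ∃ w, w ∈ (satInner color v c1 c2 st ws).1 ∧ w ∉ st.1 ∧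
        satColorOk color c1 c2 w = true := by
  intro ws
  induction ws with
  | nil => intro st h; exact Or.inl h
  | cons w rest ih =>
    intro st h
    simp only [satInner, List.foldl_cons] at *
    by_cases hc : (!PySem.Set.contains st.1 w && satElig color v c1 c2 w) = true
    · rw [if_pos hc] at h ⊢
      refine Or.inr ⟨w, ?_, ?_, ?_⟩
      · exact satInner_mono color v c1 c2 rest _ w
          ((PySem.Set.mem_add st.1 w w).mpr (Or.inr rfl))
      · intro hmem
        have : PySem.Set.contains st.1 w = true := (PySem.Set.contains_iff st.1 w).mpr hmem
        rw [this] at hc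
        simp at hc
      · have : satElig color v c1 c2 w = true := by
          simp only [Bool.and_eq_true] at hc; exact hc.2
        unfold satElig at this
        simp only [Bool.and_eq_true] at this
        exact this.2
    · rw [if_neg hc] at h ⊢
      exact ih st h

theorem satFold_new (color : List (Int × Int)) (v c1 c2 : Int) :
    ∀ (l : List (Int × List Int)) (st : PySem.Set Int × Bool),
      (l.foldl (satStep color v c1 c2) st).2 = true →
      st.2 = true ∨ ∃ w, w ∈ (l.foldl (satStep color v c1 c2) st).1 ∧ w ∉ st.1 ∧
        satColorOk color c1 c2 w = true := by
  intro l
  induction l with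
  | nil => intro st h; exact Or.inl h
  | cons p rest ih =>
    intro st h
    simp only [List.foldl_cons] at *
    rcases ih (satStep color v c1 c2 st p) h with h2 | ⟨w, hw1, hw2, hw3⟩
    · by_cases hc : PySem.Set.contains st.1 p.1 = true
      · have h2' : (satInner color v c1 c2 st p.2).2 = true := by
          unfold satStep at h2; rw [if_pos hc] at h2; exact h2
        rcases satInner_new color v c1 c2 p.2 st h2' with h3 | ⟨w, hw1, hw2, hw3⟩
        · exact Or.inl h3
        · refine Or.inr ⟨w, ?_, hw2, hw3⟩
          have heqs : satStep color v c1 c2 st p = satInner color v c1 c2 st p.2 := by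
            unfold satStep; rw [if_pos hc]
          rw [heqs]
          exact satFold_mono color v c1 c2 rest _ w hw1
      · refine Or.inl ?_
        unfold satStep at h2; rw [if_neg hc] at h2; exact h2
    · refine Or.inr ⟨w, hw1, ?_, hw3⟩
      intro hmem
      apply hw2
      unfold satStep
      by_cases hc : PySem.Set.contains st.1 p.1 = true
      · rw [if_pos hc]; exact satInner_mono color v c1 c2 p.2 st w hmem
      · rw [if_neg hc]; exact hmem

-- the 'while changed' loop
def satLoop (adj : List (Int × List Int)) (color : List (Int × Int)) (v c1 c2 : Int)
    (reach : PySem.Set Int) : PySem.Set Int :=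
  if (satPass adj color v c1 c2 reach).2 = true then
    satLoop adj color v c1 c2 (satPass adj color v c1 c2 reach).1
  else (satPass adj color v c1 c2 reach).1
termination_by ((color.map Prod.fst).filter (fun x => !PySem.Set.contains reach x)).length
decreasing_by
  rename_i h
  rcases satFold_new color v c1 c2 (satItems adj) (reach, false) h with h2 | ⟨w, hw1, hw2, hw3⟩
  · simp at h2
  · apply pvLenFilterLt (l := color.map Prod.fst)
      (p := fun x => !PySem.Set.contains reach x)
      (q := fun x => !PySem.Set.contains (satPass adj color v c1 c2 reach).1 x) (u := w)
    · intro x hx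
      simp only [Bool.not_eq_true'] at hx ⊢
      cases hr : PySem.Set.contains reach x
      · rfl
      · have : x ∈ (satPass adj color v c1 c2 reach).1 :=
          satFold_mono color v c1 c2 (satItems adj) (reach, false) x
            ((PySem.Set.contains_iff reach x).mp hr)
        rw [(PySem.Set.contains_iff _ x).mpr this] at hx
        cases hx
    · apply pvGetMemKeys
      unfold satColorOk at hw3
      cases hg : PySem.Dict.get? (PySem.Dict.mk color) w <;> simp [hg] at hw3 ⊢
    · show (!PySem.Set.contains reach w) = true
      have hr : PySem.Set.contains reach w = false := by
        cases hr : PySem.Set.contains reach w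
        · rfl
        · exact absurd ((PySem.Set.contains_iff reach w).mp hr) hw2
      rw [hr]
      rfl
    · show (!PySem.Set.contains (satPass adj color v c1 c2 reach).1 w) = false
      rw [(PySem.Set.contains_iff _ w).mpr
        (show w ∈ (satPass adj color v c1 c2 reach).1 from hw1)]
      rfl

def is_strictly_tangled_alt (adj : List (Int × List Int)) (color : List (Int × Int)) (v : Int) (c1 : Int) (c2 : Int) : Bool :=
  -- adj[v]: Pre_ excludes the KeyError case (v not a key of adj)
  let adjv := (PySem.Dict.get? (PySem.Dict.mk adj) v).getD []
  let nbrs1 := adjv.filter (fun u => PySem.Dict.get? (PySem.Dict.mk color) u == some c1)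
  let nbrs2 := adjv.filter (fun u => PySem.Dict.get? (PySem.Dict.mk color) u == some c2)
  if nbrs1.isEmpty || nbrs2.isEmpty then false
  else
    let seed := nbrs1.headD 0   -- nbrs_c1[0]; nbrs1 is nonempty here
    let reach0 := if satElig color v c1 c2 seed then PySem.Set.add PySem.Set.empty seed
                  else PySem.Set.empty
    let reach := satLoop adj color v c1 c2 reach0
    nbrs1.all (fun u => PySem.Set.contains reach u) && nbrs2.all (fun u => PySem.Set.contains reach u)

-- ===== PRECONDITION & SPEC =====
-- Pre_ excludes exactly the inputs where Python A raises KeyError on adj[v] (B raises there too).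
def Pre_is_strictly_tangled (adj : List (Int × List Int)) (color : List (Int × Int)) (v : Int) (c1 : Int) (c2 : Int) : Prop :=
  (PySem.Dict.get? (PySem.Dict.mk adj) v).isSome = true
instance (adj : List (Int × List Int)) (color : List (Int × Int)) (v : Int) (c1 : Int) (c2 : Int) : Decidable (Pre_is_strictly_tangled adj color v c1 c2) := by unfold Pre_is_strictly_tangled; infer_instance
def pvWitness_is_strictly_tangled : (List (Int × List Int)) × (List (Int × Int)) × Int × Int × Int :=
  ([(0, [1, 2])], [(1, 1), (2, 2)], 0, 1, 2)

def Spec_is_strictly_tangled (adj : List (Int × List Int)) (color : List (Int × Int)) (v : Int) (c1 : Int) (c2 : Int) (out : Bool) : Prop := out = is_strictly_tangled_alt adj color v c1 c2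
instance (adj : List (Int × List Int)) (color : List (Int × Int)) (v : Int) (c1 : Int) (c2 : Int) (out : Bool) : Decidable (Spec_is_strictly_tangled adj color v c1 c2 out) := by unfold Spec_is_strictly_tangled; infer_instance

-- ===== CLAIM (what is proved, stated in full; the proofs are below) =====
def Claim_equal_is_strictly_tangled : Prop := ∀ (adj : List (Int × List Int)) (color : List (Int × Int)) (v : Int) (c1 : Int) (c2 : Int), Dom_is_strictly_tangled adj color v c1 c2 → Pre_is_strictly_tangled adj color v c1 c2 → Spec_is_strictly_tangled adj color v c1 c2 (is_strictly_tangled adj color v c1 c2)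

-- ===== LEMMAS AND PROOFS =====

-- a vertex is eligible for a chain iff it is not v and carries colour c1 or c2
def pvElig (color : List (Int × Int)) (v c1 c2 u : Int) : Bool :=
  !(u == v) && kcColorOk color c1 c2 u

theorem satElig_eq (color : List (Int × Int)) (v c1 c2 u : Int) :
    satElig color v c1 c2 u = pvElig color v c1 c2 u := rfl

-- reachability through eligible vertices (every vertex on the path eligible)
inductive pvRch (adj : List (Int × List Int)) (color : List (Int × Int)) (v c1 c2 : Int) : Int → Int → Prop
  | refl (s : Int) : pvElig color v c1 c2 s = true → pvRch adj color v c1 c2 s s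
  | head (s w t : Int) : pvElig color v c1 c2 s = true → w ∈ kcNbrs adj s →
      pvRch adj color v c1 c2 w t → pvRch adj color v c1 c2 s t

theorem pvRch_elig_left {adj color v c1 c2 s t} (h : pvRch adj color v c1 c2 s t) :
    pvElig color v c1 c2 s = true := by cases h <;> assumption

theorem pvRch_elig_right {adj color v c1 c2 s t} (h : pvRch adj color v c1 c2 s t) :
    pvElig color v c1 c2 t = true := by
  induction h with
  | refl s hs => exact hs
  | head s w t _ _ _ ih => exact ih

theorem pvRch_snoc {adj color v c1 c2 s u w} (h : pvRch adj color v c1 c2 s u)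
    (hw : w ∈ kcNbrs adj u) (he : pvElig color v c1 c2 w = true) :
    pvRch adj color v c1 c2 s w := by
  revert hw
  induction h with
  | refl a ha => intro hw; exact pvRch.head a w w ha hw (pvRch.refl w he)
  | head a b t hb hn _ ih => intro hw; exact pvRch.head a b w hb hn (ih hw)

theorem pvRch_trans {adj color v c1 c2 a b c} (h1 : pvRch adj color v c1 c2 a b)
    (h2 : pvRch adj color v c1 c2 b c) : pvRch adj color v c1 c2 a c := by
  induction h1 with
  | refl s _ => exact h2
  | head s w t hs hn _ ih => exact pvRch.head s w c hs hn (ih h2)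

-- ---- A side: the BFS worklist characterisation (invariant over visited/queue) ----

-- worklist invariant: every eligible neighbour of a visited vertex is visited or queued
def pvInv (adj : List (Int × List Int)) (color : List (Int × Int)) (v c1 c2 : Int)
    (V : PySem.Set Int) (W : List Int) : Prop :=
  ∀ x ∈ V, ∀ w ∈ kcNbrs adj x, pvElig color v c1 c2 w = true → w ∈ V ∨ w ∈ W

theorem pvClosedReach {adj color v c1 c2 V W y x}
    (hInv : pvInv adj color v c1 c2 V W) (hr : pvRch adj color v c1 c2 y x) (hy : y ∈ V) :
    x ∈ V ∨ ∃ z ∈ W, pvRch adj color v c1 c2 z x ∧ z ∉ V := by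
  revert hy
  induction hr with
  | refl s hs => intro hy; exact Or.inl hy
  | head s w t hs hw hwt ih =>
    intro hy
    rcases hInv s hy w hw (pvRch_elig_left hwt) with hwV | hwW
    · exact ih hwV
    · by_cases hwV : w ∈ V
      · exact ih hwV
      · exact Or.inr ⟨w, hwW, hwt, hwV⟩

-- dropping a skippable head of the worklist changes nothing
theorem pvSkipStep {adj color v c1 c2 V u rest}
    (hInv : pvInv adj color v c1 c2 V (u :: rest))
    (h : u ∈ V ∨ pvElig color v c1 c2 u = false) :
    pvInv adj color v c1 c2 V rest ∧
      ∀ x, ((x ∈ V ∨ ∃ y ∈ rest, pvRch adj color v c1 c2 y x) ↔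
            (x ∈ V ∨ ∃ y ∈ u :: rest, pvRch adj color v c1 c2 y x)) := by
  constructor
  · intro x hx w hwn hwe
    rcases hInv x hx w hwn hwe with h1 | h2
    · exact Or.inl h1
    · rcases List.mem_cons.mp h2 with rfl | h3
      · rcases h with huV | helig
        · exact Or.inl huV
        · rw [hwe] at helig; cases helig
      · exact Or.inr h3
  · intro x
    constructor
    · rintro (hx | ⟨y, hy, hr⟩)
      · exact Or.inl hx
      · exact Or.inr ⟨y, List.mem_cons_of_mem _ hy, hr⟩
    · rintro (hx | ⟨y, hy, hr⟩)
      · exact Or.inl hx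
      · rcases List.mem_cons.mp hy with rfl | hyr
        · rcases h with huV | helig
          · rcases pvClosedReach hInv hr huV with hxV | ⟨z, hz, hrz, hznV⟩
            · exact Or.inl hxV
            · rcases List.mem_cons.mp hz with rfl | hzr
              · exact absurd huV hznV
              · exact Or.inr ⟨z, hzr, hrz⟩
          · rw [pvRch_elig_left hr] at helig; cases helig
        · exact Or.inr ⟨y, hyr, hr⟩

-- expanding an eligible unvisited head: any worklist covering its eligible neighbours works
theorem pvExpandStep {adj color v c1 c2 V u rest} (W' P : List Int)
    (hInv : pvInv adj color v c1 c2 V (u :: rest))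
    (hu : pvElig color v c1 c2 u = true) (huV : u ∉ V)
    (hW' : ∀ y, y ∈ W' ↔ y ∈ rest ∨ y ∈ P)
    (hP1 : ∀ w ∈ kcNbrs adj u, pvElig color v c1 c2 w = true → w ∈ PySem.Set.add V u ∨ w ∈ P)
    (hP2 : ∀ w ∈ P, w ∈ kcNbrs adj u) :
    pvInv adj color v c1 c2 (PySem.Set.add V u) W' ∧
      ∀ x, ((x ∈ PySem.Set.add V u ∨ ∃ y ∈ W', pvRch adj color v c1 c2 y x) ↔
            (x ∈ V ∨ ∃ y ∈ u :: rest, pvRch adj color v c1 c2 y x)) := by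
  have hInv' : pvInv adj color v c1 c2 (PySem.Set.add V u) W' := by
    intro x hx w hwn hwe
    rcases (PySem.Set.mem_add V u x).mp hx with hxV | rfl
    · rcases hInv x hxV w hwn hwe with h1 | h2
      · exact Or.inl ((PySem.Set.mem_add V u w).mpr (Or.inl h1))
      · rcases List.mem_cons.mp h2 with rfl | h3
        · exact Or.inl ((PySem.Set.mem_add V w w).mpr (Or.inr rfl))
        · exact Or.inr ((hW' w).mpr (Or.inl h3))
    · rcases hP1 w hwn hwe with h1 | h2
      · exact Or.inl h1
      · exact Or.inr ((hW' w).mpr (Or.inr h2))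
  refine ⟨hInv', fun x => ⟨?_, ?_⟩⟩
  · rintro (hx | ⟨y, hy, hr⟩)
    · rcases (PySem.Set.mem_add V u x).mp hx with hxV | rfl
      · exact Or.inl hxV
      · exact Or.inr ⟨x, List.mem_cons_self, pvRch.refl x hu⟩
    · rcases (hW' y).mp hy with hyr | hyP
      · exact Or.inr ⟨y, List.mem_cons_of_mem _ hyr, hr⟩
      · exact Or.inr ⟨u, List.mem_cons_self,
          pvRch.head u y x hu (hP2 y hyP) hr⟩
  · rintro (hx | ⟨y, hy, hr⟩)
    · exact Or.inl ((PySem.Set.mem_add V u x).mpr (Or.inl hx))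
    · rcases List.mem_cons.mp hy with rfl | hyr
      · cases hr with
        | refl a ha => exact Or.inl ((PySem.Set.mem_add V _ _).mpr (Or.inr rfl))
        | head _ w _ hu' hwn hwx =>
          rcases hP1 w hwn (pvRch_elig_left hwx) with h1 | h2
          · rcases pvClosedReach hInv' hwx h1 with hxA | ⟨z, hz, hrz, _⟩
            · exact Or.inl hxA
            · exact Or.inr ⟨z, hz, hrz⟩
          · exact Or.inr ⟨w, (hW' w).mpr (Or.inr h2), hwx⟩
      · exact Or.inr ⟨y, (hW' y).mpr (Or.inl hyr), hr⟩

theorem kempeLoop_mem (adj : List (Int × List Int)) (color : List (Int × Int)) (v c1 c2 : Int)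
    (V : PySem.Set Int) (W : List Int) (hInv : pvInv adj color v c1 c2 V W) (x : Int) :
    (x ∈ kempeLoop adj color c1 c2 [v] V W ↔
      x ∈ V ∨ ∃ y ∈ W, pvRch adj color v c1 c2 y x) :=
  match W, hInv with
  | [], hInv => by
    rw [kempeLoop]
    simp
  | u :: rest, hInv => by
    rw [kempeLoop]
    by_cases h1 : (PySem.Set.contains V u || List.contains [v] u) = true
    · rw [if_pos h1]
      have hcase : u ∈ V ∨ pvElig color v c1 c2 u = false := by
        simp only [Bool.or_eq_true] at h1
        rcases h1 with hc | hc
        · exact Or.inl ((PySem.Set.contains_iff V u).mp hc)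
        · have huv : u = v := by simpa using hc
          exact Or.inr (by simp [pvElig, huv])
      obtain ⟨hInv', hiff⟩ := pvSkipStep hInv hcase
      exact (kempeLoop_mem adj color v c1 c2 V rest hInv' x).trans (hiff x)
    · rw [if_neg h1]
      by_cases h2 : (!kcColorOk color c1 c2 u) = true
      · rw [if_pos h2]
        have hcase : u ∈ V ∨ pvElig color v c1 c2 u = false := by
          have hc2 : kcColorOk color c1 c2 u = false := by simpa using h2
          exact Or.inr (by simp [pvElig, hc2])
        obtain ⟨hInv', hiff⟩ := pvSkipStep hInv hcase
        exact (kempeLoop_mem adj color v c1 c2 V rest hInv' x).trans (hiff x)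
      · rw [if_neg h2]
        simp only [Bool.or_eq_true, not_or, Bool.not_eq_true] at h1
        have hcol : kcColorOk color c1 c2 u = true := by
          cases hc : kcColorOk color c1 c2 u
          · rw [hc] at h2; simp at h2
          · rfl
        have huv : u ≠ v := by
          intro hh
          have := h1.2
          simp [hh] at this
        have hu : pvElig color v c1 c2 u = true := by simp [pvElig, huv, hcol]
        have hV : u ∉ V := fun hm => by
          rw [(PySem.Set.contains_iff V u).mpr hm] at h1
          exact absurd h1.1 (by simp)
        have hP1 : ∀ w ∈ kcNbrs adj u, pvElig color v c1 c2 w = true →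
            w ∈ PySem.Set.add V u ∨ w ∈ (kcNbrs adj u).filter
              (fun w => !PySem.Set.contains (PySem.Set.add V u) w && !List.contains [v] w && kcColorOk color c1 c2 w) := by
          intro w hwn hwe
          by_cases hc : w ∈ PySem.Set.add V u
          · exact Or.inl hc
          · refine Or.inr (List.mem_filter.mpr ⟨hwn, ?_⟩)
            have hce : PySem.Set.contains (PySem.Set.add V u) w = false := by
              cases hcc : PySem.Set.contains (PySem.Set.add V u) w
              · rfl
              · exact absurd ((PySem.Set.contains_iff _ w).mp hcc) hc
            have hwv : ¬(w = v) := by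
              intro hh
              simp [pvElig, hh] at hwe
            have hwc : kcColorOk color c1 c2 w = true := by
              simp [pvElig] at hwe
              exact hwe.2
            have hl : List.contains [v] w = false := by simp [hwv]
            rw [hce, hl, hwc]
            rfl
        have hP2 : ∀ w ∈ (kcNbrs adj u).filter
            (fun w => !PySem.Set.contains (PySem.Set.add V u) w && !List.contains [v] w && kcColorOk color c1 c2 w),
            w ∈ kcNbrs adj u := fun w hw => (List.mem_filter.mp hw).1
        obtain ⟨hInv', hiff⟩ := pvExpandStep
          (W' := rest ++ (kcNbrs adj u).filter
            (fun w => !PySem.Set.contains (PySem.Set.add V u) w && !List.contains [v] w && kcColorOk color c1 c2 w))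
          (P := (kcNbrs adj u).filter
            (fun w => !PySem.Set.contains (PySem.Set.add V u) w && !List.contains [v] w && kcColorOk color c1 c2 w))
          hInv hu hV (fun y => by simp [List.mem_append]) hP1 hP2
        exact (kempeLoop_mem adj color v c1 c2 (PySem.Set.add V u) _ hInv' x).trans (hiff x)
termination_by ((((color.map Prod.fst).filter (fun x => !PySem.Set.contains V x)).length, W.length) : Nat × Nat)
decreasing_by
  · exact Prod.Lex.right _ (by simp)
  · exact Prod.Lex.right _ (by simp)
  · apply Prod.Lex.left
    apply pvMeasureLt
    · apply pvGetMemKeys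
      unfold kcColorOk at hcol
      cases hg : PySem.Dict.get? (PySem.Dict.mk color) u <;> simp [hg] at hcol ⊢
    · cases hcc : PySem.Set.contains V u
      · rfl
      · exact absurd ((PySem.Set.contains_iff V u).mp hcc) hV

theorem pvInvEmpty (adj : List (Int × List Int)) (color : List (Int × Int)) (v c1 c2 : Int)
    (W : List Int) : pvInv adj color v c1 c2 PySem.Set.empty W :=
  fun x hx => absurd hx (by simp [PySem.Set.empty])

theorem kempe_chain_mem (adj : List (Int × List Int)) (color : List (Int × Int)) (v c1 c2 s x : Int) :
    (x ∈ kempe_chain adj color s c1 c2 [v] ↔ pvRch adj color v c1 c2 s x) := by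
  rw [kempe_chain]
  by_cases hg : (List.contains [v] s || !kcColorOk color c1 c2 s) = true
  · rw [if_pos hg]
    have hse : pvElig color v c1 c2 s = false := by
      simp only [Bool.or_eq_true] at hg
      rcases hg with hc | hc
      · have : s = v := by simpa using hc
        simp [pvElig, this]
      · have : kcColorOk color c1 c2 s = false := by simpa using hc
        simp [pvElig, this]
    simp only [PySem.Set.empty, List.mem_nil_iff, false_iff]
    intro hr
    rw [pvRch_elig_left hr] at hse
    cases hse
  · rw [if_neg hg]
    exact (kempeLoop_mem adj color v c1 c2 PySem.Set.empty [s]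
      (pvInvEmpty adj color v c1 c2 [s]) x).trans (by simp [PySem.Set.empty])

-- ---- B side: the saturation loop computes the same reachable set ----

theorem satItems_get (adj : List (Int × List Int)) :
    ∀ p ∈ satItems adj, PySem.Dict.get? (PySem.Dict.mk adj) p.1 = some p.2 := by
  intro p hp
  have := (List.mem_filter.mp hp).2
  simpa using this

theorem satItems_mem {adj : List (Int × List Int)} {u : Int} {ws : List Int}
    (h : PySem.Dict.get? (PySem.Dict.mk adj) u = some ws) : (u, ws) ∈ satItems adj := by
  apply List.mem_filter.mpr
  refine ⟨?_, by simpa using h⟩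
  exact PySem.Dict.mem_items_of_get?_eq_some (PySem.Dict.mk adj) h

theorem satInner_sound (color : List (Int × Int)) (v c1 c2 : Int) (R : Int → Prop) :
    ∀ (ws : List Int) (st : PySem.Set Int × Bool),
      (∀ x ∈ st.1, R x) → (∀ w ∈ ws, satElig color v c1 c2 w = true → R w) →
      ∀ x ∈ (satInner color v c1 c2 st ws).1, R x := by
  intro ws
  induction ws with
  | nil => intro st hst _ x hx; exact hst x hx
  | cons w rest ih =>
    intro st hst hws x hx
    simp only [satInner, List.foldl_cons] at hx
    by_cases hc : (!PySem.Set.contains st.1 w && satElig color v c1 c2 w) = true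
    · rw [if_pos hc] at hx
      refine ih _ ?_ (fun w' hw' he => hws w' (List.mem_cons_of_mem _ hw') he) x hx
      intro y hy
      rcases (PySem.Set.mem_add st.1 w y).mp hy with hy' | rfl
      · exact hst y hy'
      · exact hws y List.mem_cons_self (by simp only [Bool.and_eq_true] at hc; exact hc.2)
    · rw [if_neg hc] at hx
      exact ih st hst (fun w' hw' he => hws w' (List.mem_cons_of_mem _ hw') he) x hx

theorem satFold_sound (adj : List (Int × List Int)) (color : List (Int × Int)) (v c1 c2 : Int)
    (R : Int → Prop)
    (hR : ∀ u w, R u → w ∈ kcNbrs adj u → satElig color v c1 c2 w = true → R w) :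
    ∀ (l : List (Int × List Int)) (st : PySem.Set Int × Bool),
      (∀ p ∈ l, PySem.Dict.get? (PySem.Dict.mk adj) p.1 = some p.2) →
      (∀ x ∈ st.1, R x) →
      ∀ x ∈ (l.foldl (satStep color v c1 c2) st).1, R x := by
  intro l
  induction l with
  | nil => intro st _ hst x hx; exact hst x hx
  | cons p rest ih =>
    intro st hl hst x hx
    simp only [List.foldl_cons] at hx
    refine ih _ (fun q hq => hl q (List.mem_cons_of_mem _ hq)) ?_ x hx
    intro y hy
    unfold satStep at hy
    by_cases hc : PySem.Set.contains st.1 p.1 = true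
    · rw [if_pos hc] at hy
      refine satInner_sound color v c1 c2 R p.2 st hst ?_ y hy
      intro w hw he
      have hu : R p.1 := hst p.1 ((PySem.Set.contains_iff st.1 p.1).mp hc)
      have hn : w ∈ kcNbrs adj p.1 := by
        unfold kcNbrs
        rw [hl p List.mem_cons_self]
        exact hw
      exact hR p.1 w hu hn he
    · rw [if_neg hc] at hy
      exact hst y hy

theorem satInner_flag (color : List (Int × Int)) (v c1 c2 : Int) :
    ∀ (ws : List Int) (st : PySem.Set Int × Bool),
      st.2 = true → (satInner color v c1 c2 st ws).2 = true := by
  intro ws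
  induction ws with
  | nil => intro st h; exact h
  | cons w rest ih =>
    intro st h
    simp only [satInner, List.foldl_cons]
    by_cases hc : (!PySem.Set.contains st.1 w && satElig color v c1 c2 w) = true
    · rw [if_pos hc]; exact ih _ rfl
    · rw [if_neg hc]; exact ih st h

theorem satFold_flag (color : List (Int × Int)) (v c1 c2 : Int) :
    ∀ (l : List (Int × List Int)) (st : PySem.Set Int × Bool),
      st.2 = true → (l.foldl (satStep color v c1 c2) st).2 = true := by
  intro l
  induction l with
  | nil => intro st h; exact h
  | cons p rest ih =>
    intro st h
    simp only [List.foldl_cons]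
    apply ih
    unfold satStep
    by_cases hc : PySem.Set.contains st.1 p.1 = true
    · rw [if_pos hc]; exact satInner_flag color v c1 c2 p.2 st h
    · rw [if_neg hc]; exact h

theorem satInner_nochange (color : List (Int × Int)) (v c1 c2 : Int) :
    ∀ (ws : List Int) (st : PySem.Set Int × Bool),
      (satInner color v c1 c2 st ws).2 = false →
      satInner color v c1 c2 st ws = st ∧
        ∀ w ∈ ws, satElig color v c1 c2 w = true → w ∈ st.1 := by
  intro ws
  induction ws with
  | nil => intro st _; exact ⟨rfl, by simp⟩
  | cons w rest ih =>
    intro st h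
    simp only [satInner, List.foldl_cons] at h ⊢
    by_cases hc : (!PySem.Set.contains st.1 w && satElig color v c1 c2 w) = true
    · rw [if_pos hc] at h
      have : (satInner color v c1 c2 (PySem.Set.add st.1 w, true) rest).2 = true :=
        satInner_flag color v c1 c2 rest _ rfl
      rw [show (rest.foldl (fun st w =>
          if !PySem.Set.contains st.1 w && satElig color v c1 c2 w then
            (PySem.Set.add st.1 w, true) else st) (PySem.Set.add st.1 w, true)) =
          satInner color v c1 c2 (PySem.Set.add st.1 w, true) rest from rfl, this] at h
      cases h
    · rw [if_neg hc] at h ⊢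
      obtain ⟨heq, hall⟩ := ih st h
      refine ⟨heq, ?_⟩
      intro w' hw' he
      rcases List.mem_cons.mp hw' with rfl | hw''
      · by_contra hmem
        have hct : PySem.Set.contains st.1 w' = false := by
          cases hcc : PySem.Set.contains st.1 w'
          · rfl
          · exact absurd ((PySem.Set.contains_iff st.1 w').mp hcc) hmem
        rw [hct, he] at hc
        simp at hc
      · exact hall w' hw'' he

theorem satFold_nochange (color : List (Int × Int)) (v c1 c2 : Int) :
    ∀ (l : List (Int × List Int)) (st : PySem.Set Int × Bool),
      (l.foldl (satStep color v c1 c2) st).2 = false →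
      l.foldl (satStep color v c1 c2) st = st ∧
        ∀ p ∈ l, PySem.Set.contains st.1 p.1 = true →
          ∀ w ∈ p.2, satElig color v c1 c2 w = true → w ∈ st.1 := by
  intro l
  induction l with
  | nil => intro st _; exact ⟨rfl, by simp⟩
  | cons p rest ih =>
    intro st h
    simp only [List.foldl_cons] at h ⊢
    by_cases hc : PySem.Set.contains st.1 p.1 = true
    · have hstep : satStep color v c1 c2 st p = satInner color v c1 c2 st p.2 := by
        unfold satStep; rw [if_pos hc]
      rw [hstep] at h ⊢
      have hin2 : (satInner color v c1 c2 st p.2).2 = false := by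
        cases hcc : (satInner color v c1 c2 st p.2).2
        · rfl
        · rw [satFold_flag color v c1 c2 rest _ hcc] at h; cases h
      obtain ⟨hieq, hiall⟩ := satInner_nochange color v c1 c2 p.2 st hin2
      rw [hieq] at h ⊢
      obtain ⟨heq, hall⟩ := ih st h
      refine ⟨heq, ?_⟩
      intro q hq hcq w hw he
      rcases List.mem_cons.mp hq with rfl | hq'
      · exact hiall w hw he
      · exact hall q hq' hcq w hw he
    · have hstep : satStep color v c1 c2 st p = st := by
        unfold satStep; rw [if_neg hc]
      rw [hstep] at h ⊢
      obtain ⟨heq, hall⟩ := ih st h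
      refine ⟨heq, ?_⟩
      intro q hq hcq w hw he
      rcases List.mem_cons.mp hq with rfl | hq'
      · rw [hcq] at hc; exact absurd rfl hc
      · exact hall q hq' hcq w hw he

theorem satClosed_reach {adj : List (Int × List Int)} {color : List (Int × Int)} {v c1 c2 : Int}
    {reach : PySem.Set Int}
    (hcl : ∀ u ∈ reach, ∀ w ∈ kcNbrs adj u, pvElig color v c1 c2 w = true → w ∈ reach)
    {s x : Int} (h : pvRch adj color v c1 c2 s x) (hs : s ∈ reach) : x ∈ reach := by
  revert hs
  induction h with
  | refl a _ => intro hs; exact hs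
  | head a w t _ hn hwt ih =>
    intro hs
    exact ih (hcl a hs w hn (pvRch_elig_left hwt))

theorem satLoop_mem (adj : List (Int × List Int)) (color : List (Int × Int)) (v c1 c2 : Int)
    (reach : PySem.Set Int)
    (helig : ∀ u ∈ reach, pvElig color v c1 c2 u = true) (x : Int) :
    (x ∈ satLoop adj color v c1 c2 reach ↔
      ∃ u ∈ reach, pvRch adj color v c1 c2 u x) := by
  have hsound : ∀ y ∈ (satPass adj color v c1 c2 reach).1,
      ∃ u ∈ reach, pvRch adj color v c1 c2 u y := by
    apply satFold_sound adj color v c1 c2 (fun y => ∃ u ∈ reach, pvRch adj color v c1 c2 u y)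
    · rintro a w ⟨u, hu, hr⟩ hn he
      exact ⟨u, hu, pvRch_snoc hr hn (by rw [← satElig_eq]; exact he)⟩
    · exact satItems_get adj
    · intro y hy
      exact ⟨y, hy, pvRch.refl y (helig y hy)⟩
  rw [satLoop]
  by_cases h : (satPass adj color v c1 c2 reach).2 = true
  · rw [if_pos h]
    have helig' : ∀ u ∈ (satPass adj color v c1 c2 reach).1, pvElig color v c1 c2 u = true := by
      intro u hu
      obtain ⟨u0, _, hr⟩ := hsound u hu
      exact pvRch_elig_right hr
    rw [satLoop_mem adj color v c1 c2 _ helig' x]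
    constructor
    · rintro ⟨u, hu, hr⟩
      obtain ⟨u0, hu0, hr0⟩ := hsound u hu
      exact ⟨u0, hu0, pvRch_trans hr0 hr⟩
    · rintro ⟨u, hu, hr⟩
      refine ⟨u, ?_, hr⟩
      exact satFold_mono color v c1 c2 (satItems adj) (reach, false) u hu
  · rw [if_neg h]
    have h' : (satPass adj color v c1 c2 reach).2 = false := by
      cases hc : (satPass adj color v c1 c2 reach).2
      · rfl
      · exact absurd hc h
    obtain ⟨heq, hall⟩ := satFold_nochange color v c1 c2 (satItems adj) (reach, false) h'
    unfold satPass
    rw [show ((satItems adj).foldl (satStep color v c1 c2) (reach, false)).1 = reach by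
      rw [heq]]
    constructor
    · intro hx
      exact ⟨x, hx, pvRch.refl x (helig x hx)⟩
    · rintro ⟨u, hu, hr⟩
      refine satClosed_reach ?_ hr hu
      intro a ha w hn he
      cases hg : PySem.Dict.get? (PySem.Dict.mk adj) a with
      | none =>
        unfold kcNbrs at hn
        rw [hg] at hn
        cases hn
      | some ws =>
        have hp : (a, ws) ∈ satItems adj := satItems_mem hg
        have hca : PySem.Set.contains reach a = true := (PySem.Set.contains_iff reach a).mpr ha
        have hw : w ∈ ws := by
          unfold kcNbrs at hn
          rw [hg] at hn
          exact hn
        exact hall (a, ws) hp hca w hw (by rw [satElig_eq]; exact he)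
termination_by ((color.map Prod.fst).filter (fun x => !PySem.Set.contains reach x)).length
decreasing_by
  rcases satFold_new color v c1 c2 (satItems adj) (reach, false) h with h2 | ⟨w, hw1, hw2, hw3⟩
  · simp at h2
  · apply pvLenFilterLt (l := color.map Prod.fst)
      (p := fun x => !PySem.Set.contains reach x)
      (q := fun x => !PySem.Set.contains (satPass adj color v c1 c2 reach).1 x) (u := w)
    · intro x hx
      simp only [Bool.not_eq_true'] at hx ⊢
      cases hr : PySem.Set.contains reach x
      · rfl
      · have : x ∈ (satPass adj color v c1 c2 reach).1 :=
          satFold_mono color v c1 c2 (satItems adj) (reach, false) x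
            ((PySem.Set.contains_iff reach x).mp hr)
        rw [(PySem.Set.contains_iff _ x).mpr this] at hx
        cases hx
    · apply pvGetMemKeys
      unfold satColorOk at hw3
      cases hg : PySem.Dict.get? (PySem.Dict.mk color) w <;> simp [hg] at hw3 ⊢
    · show (!PySem.Set.contains reach w) = true
      have hr : PySem.Set.contains reach w = false := by
        cases hr : PySem.Set.contains reach w
        · rfl
        · exact absurd ((PySem.Set.contains_iff reach w).mp hr) hw2
      rw [hr]
      rfl
    · show (!PySem.Set.contains (satPass adj color v c1 c2 reach).1 w) = false
      rw [(PySem.Set.contains_iff _ w).mpr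
        (show w ∈ (satPass adj color v c1 c2 reach).1 from hw1)]
      rfl

-- B's whole chain computation, characterised by reachability from the seed
theorem satResult_mem (adj : List (Int × List Int)) (color : List (Int × Int)) (v c1 c2 s x : Int) :
    (x ∈ satLoop adj color v c1 c2
        (if satElig color v c1 c2 s then PySem.Set.add PySem.Set.empty s
         else PySem.Set.empty) ↔ pvRch adj color v c1 c2 s x) := by
  by_cases he : satElig color v c1 c2 s = true
  · rw [if_pos he]
    have hr0 : PySem.Set.add PySem.Set.empty s = [s] := by
      rw [PySem.Set.add_of_not_mem (by simp [PySem.Set.empty])]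
      rfl
    rw [hr0]
    rw [satLoop_mem adj color v c1 c2 [s]
      (by intro u hu; rw [List.mem_singleton] at hu; subst hu
          rw [← satElig_eq]; exact he) x]
    constructor
    · rintro ⟨u, hu, hr⟩
      rcases List.mem_singleton.mp hu with rfl
      exact hr
    · intro hr
      exact ⟨s, List.mem_singleton.mpr rfl, hr⟩
  · rw [if_neg he]
    rw [satLoop_mem adj color v c1 c2 PySem.Set.empty
      (by intro u hu; exact absurd hu (by simp [PySem.Set.empty])) x]
    constructor
    · rintro ⟨u, hu, _⟩
      exact absurd hu (by simp [PySem.Set.empty])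
    · intro hr
      exact absurd (pvRch_elig_left hr) (by rw [← satElig_eq]; exact he)

-- ===== VERDICT (by name: the statement is the Claim_ definition above) =====
theorem is_strictly_tangled_spec : Claim_equal_is_strictly_tangled := by
  intro adj color v c1 c2 _ _
  unfold Spec_is_strictly_tangled
  unfold is_strictly_tangled is_strictly_tangled_alt
  simp only []
  rcases hn1 : ((PySem.Dict.get? (PySem.Dict.mk adj) v).getD []).filter
      (fun u => PySem.Dict.get? (PySem.Dict.mk color) u == some c1) with _ | ⟨s, t1⟩
  · simp
  · rcases hn2 : ((PySem.Dict.get? (PySem.Dict.mk adj) v).getD []).filter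
        (fun u => PySem.Dict.get? (PySem.Dict.mk color) u == some c2) with _ | ⟨w, t2⟩
    · simp
    · simp only [List.isEmpty_cons, Bool.or_self, Bool.false_eq_true, if_false, List.headD_cons]
      have hcc : ∀ z, PySem.Set.contains (kempe_chain adj color s c1 c2 [v]) z =
          PySem.Set.contains (satLoop adj color v c1 c2
            (if satElig color v c1 c2 s then PySem.Set.add PySem.Set.empty s
             else PySem.Set.empty)) z := by
        intro z
        apply Bool.eq_iff_iff.mpr
        rw [PySem.Set.contains_iff, PySem.Set.contains_iff,
            kempe_chain_mem adj color v c1 c2 s z, satResult_mem adj color v c1 c2 s z]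
      simp only [hcc]
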